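-- pv_equiv track=rewrite | github.com/markushont/advent-of-code-2021 | advent-of-bot/lambda_function.py | format_prizes
-- ===== SOURCE A (Python) =====
-- PRIZES = {
--     30: 'biobiljetter och bubbel',
--     120: 'ost-, chark- och vinkorg',
--     300: 'ölprovning, vinprovning och whiskyprovning för två',
--     420: 'knivset och helkroppsmassage',
--     600: 'matlagningskurs för två',
--     750: 'middag för två',
--     1000: 'weekendresa för två i Europa',
--     1500: 'Hejareteslan',
--     9999: 'Det Oändliga'
-- }
--
-- def format_prizes(members):
--     total_stars = sum([m['stars'] for m in members])
--     reached_level = -1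
--     next_level = -1
--     levels = list(PRIZES.keys())
--     for i in range(len(levels)):
--         if total_stars > levels[i]:
--             reached_level = levels[i]
--             next_level = levels[i+1]
--
--     return f"Wooow :tada::tada: *{total_stars} stjärnor!* :tada::tada: Det är ju som bäst *{PRIZES[reached_level]}* och nästan *{PRIZES[next_level]}*!!"
-- ===== SOURCE B (Python) =====
-- PRIZES = {
--     30: 'biobiljetter och bubbel',
--     120: 'ost-, chark- och vinkorg',
--     300: 'ölprovning, vinprovning och whiskyprovning för två',
--     420: 'knivset och helkroppsmassage',
--     600: 'matlagningskurs för två',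
--     750: 'middag för två',
--     1000: 'weekendresa för två i Europa',
--     1500: 'Hejareteslan',
--     9999: 'Det Oändliga'
-- }
--
-- def format_prizes(members):
--     total_stars = sum(m['stars'] for m in members)
--     levels = list(PRIZES)
--     # binary search for the first level >= total_stars (bisect_left by hand)
--     lo, hi = 0, len(levels)
--     while lo < hi:
--         mid = (lo + hi) // 2
--         if levels[mid] < total_stars:
--             lo = mid + 1
--         else:
--             hi = mid
--     reached_level = levels[lo - 1]
--     next_level = levels[lo]
--     return f"Wooow :tada::tada: *{total_stars} stjärnor!* :tada::tada: Det är ju som bäst *{PRIZES[reached_level]}* och nästan *{PRIZES[next_level]}*!!"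
-- ===== Notes on version B (the rewrite author's own statement) =====
-- stated objective: alternative
-- what changed: Replaces the full linear scan that keeps overwriting reached/next level with a hand-written bisect_left binary search over the sorted level keys, indexing the tier pair directly from the insertion point.
import Mathlib
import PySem

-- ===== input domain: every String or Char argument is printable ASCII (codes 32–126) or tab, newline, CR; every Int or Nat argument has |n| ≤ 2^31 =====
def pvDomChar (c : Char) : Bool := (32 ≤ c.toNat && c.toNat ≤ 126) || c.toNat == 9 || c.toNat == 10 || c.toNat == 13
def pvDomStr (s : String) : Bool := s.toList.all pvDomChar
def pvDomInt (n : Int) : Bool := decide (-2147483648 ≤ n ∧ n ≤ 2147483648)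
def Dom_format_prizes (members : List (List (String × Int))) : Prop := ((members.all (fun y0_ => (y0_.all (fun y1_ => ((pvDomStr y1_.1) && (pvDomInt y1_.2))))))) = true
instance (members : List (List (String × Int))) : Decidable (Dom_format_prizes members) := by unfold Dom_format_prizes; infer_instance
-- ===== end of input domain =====

-- B replaces A's full linear scan (which keeps overwriting reached/next) by a hand-written
-- bisect_left binary search over the sorted level keys; same return value on Pre_.

-- the module-level PRIZES dict (shared constant of both versions)
def pvPrizes : PySem.Dict Int String := PySem.Dict.ofList
  [(30, "biobiljetter och bubbel"),
   (120, "ost-, chark- och vinkorg"),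
   (300, "ölprovning, vinprovning och whiskyprovning för två"),
   (420, "knivset och helkroppsmassage"),
   (600, "matlagningskurs för två"),
   (750, "middag för två"),
   (1000, "weekendresa för två i Europa"),
   (1500, "Hejareteslan"),
   (9999, "Det Oändliga")]

-- ===== PORT A =====
-- m['stars'] raises KeyError when missing and PRIZES[...] raises on -1; those inputs are
-- excluded by Pre_ below, the ports use .getD defaults there.
def format_prizes (members : List (List (String × Int))) : String :=
  let total_stars : Int := (members.map (fun m => (m.lookup "stars").getD 0)).foldl (· + ·) 0
  let levels := pvPrizes.keys
  let st := (PySem.List.pyRange 0 (levels.length : Int) 1).foldl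
    (fun (st : Int × Int) i =>
      if total_stars > (PySem.List.pyGet? levels i).getD 0 then
        ((PySem.List.pyGet? levels i).getD 0, (PySem.List.pyGet? levels (i + 1)).getD (-1))
      else st)
    (-1, -1)
  "Wooow :tada::tada: *" ++ PySem.Int.toStr total_stars ++
    " stjärnor!* :tada::tada: Det är ju som bäst *" ++ (pvPrizes.get? st.1).getD "" ++
    "* och nästan *" ++ (pvPrizes.get? st.2).getD "" ++ "*!!"

-- ===== PORT B =====
-- hand-written bisect_left: first index with levels[mid] >= t (the while loop of Source B)
def pvBisect (levels : List Int) (t : Int) (lo hi : Nat) : Nat :=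
  if h : lo < hi then
    let mid := (lo + hi) / 2
    if (PySem.List.pyGet? levels (mid : Int)).getD 0 < t then
      pvBisect levels t (mid + 1) hi
    else
      pvBisect levels t lo mid
  else lo
termination_by hi - lo
decreasing_by all_goals omega

def format_prizes_alt (members : List (List (String × Int))) : String :=
  let total_stars : Int := (members.map (fun m => (m.lookup "stars").getD 0)).foldl (· + ·) 0
  let levels := pvPrizes.keys
  let lo := pvBisect levels total_stars 0 levels.length
  let reached_level := (PySem.List.pyGet? levels ((lo : Int) - 1)).getD 0
  let next_level := (PySem.List.pyGet? levels (lo : Int)).getD 0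
  "Wooow :tada::tada: *" ++ PySem.Int.toStr total_stars ++
    " stjärnor!* :tada::tada: Det är ju som bäst *" ++ (pvPrizes.get? reached_level).getD "" ++
    "* och nästan *" ++ (pvPrizes.get? next_level).getD "" ++ "*!!"

-- ===== PRECONDITION & SPEC =====
-- Pre_ excludes exactly the inputs where the Python A raises: a member without the 'stars'
-- key (KeyError), a total ≤ 30 (PRIZES[-1] KeyError) and a total > 9999 (IndexError).
def Pre_format_prizes (members : List (List (String × Int))) : Prop :=
  (∀ m ∈ members, (m.lookup "stars").isSome = true) ∧
  30 < (members.map (fun m => (m.lookup "stars").getD 0)).foldl (· + ·) 0 ∧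
  (members.map (fun m => (m.lookup "stars").getD 0)).foldl (· + ·) 0 ≤ 9999
instance (members : List (List (String × Int))) : Decidable (Pre_format_prizes members) := by
  unfold Pre_format_prizes; infer_instance

def pvWitness_format_prizes : (List (List (String × Int))) := [[("stars", 100)], [("stars", 50)]]

def Spec_format_prizes (members : List (List (String × Int))) (out : String) : Prop := out = format_prizes_alt members
instance (members : List (List (String × Int))) (out : String) : Decidable (Spec_format_prizes members out) := by unfold Spec_format_prizes; infer_instance

-- ===== CLAIM (what is proved, stated in full; the proofs are below) =====
def Claim_equal_format_prizes : Prop := ∀ (members : List (List (String × Int))), Dom_format_prizes members → Pre_format_prizes members → Spec_format_prizes members (format_prizes members)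

-- ===== LEMMAS AND PROOFS =====

-- both tier computations agree for every admissible total
lemma pv_core (t : Int) (h1 : 30 < t) (h2 : t ≤ 9999) :
    ((PySem.List.pyRange 0 (pvPrizes.keys.length : Int) 1).foldl
      (fun (st : Int × Int) i =>
        if t > (PySem.List.pyGet? pvPrizes.keys i).getD 0 then
          ((PySem.List.pyGet? pvPrizes.keys i).getD 0,
           (PySem.List.pyGet? pvPrizes.keys (i + 1)).getD (-1))
        else st)
      (-1, -1)) =
    ((PySem.List.pyGet? pvPrizes.keys ((pvBisect pvPrizes.keys t 0 pvPrizes.keys.length : Int) - 1)).getD 0,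
     (PySem.List.pyGet? pvPrizes.keys (pvBisect pvPrizes.keys t 0 pvPrizes.keys.length : Int)).getD 0) := by
  have hk : pvPrizes.keys = [30,120,300,420,600,750,1000,1500,9999] := by decide
  have hr : PySem.List.pyRange 0 (9:Int) 1 = [0,1,2,3,4,5,6,7,8] := by decide
  rw [hk]
  simp only [List.length_cons, List.length_nil]
  have hcases : (t ≤ 120) ∨ (120 < t ∧ t ≤ 300) ∨ (300 < t ∧ t ≤ 420) ∨ (420 < t ∧ t ≤ 600) ∨ (600 < t ∧ t ≤ 750) ∨ (750 < t ∧ t ≤ 1000) ∨ (1000 < t ∧ t ≤ 1500) ∨ (1500 < t ∧ t ≤ 9999) := by omega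
  rcases hcases with h | h | h | h | h | h | h | h
  · have hb : pvBisect [30,120,300,420,600,750,1000,1500,9999] t 0 9 = 1 := by
      simp [pvBisect, PySem.List.pyGet?, PySem.List.pyIdx?]
      split_ifs <;> omega
    rw [hb]
    have c0 : 30 < t := by omega
    have c1 : ¬ (120 < t) := by omega
    have c2 : ¬ (300 < t) := by omega
    have c3 : ¬ (420 < t) := by omega
    have c4 : ¬ (600 < t) := by omega
    have c5 : ¬ (750 < t) := by omega
    have c6 : ¬ (1000 < t) := by omega
    have c7 : ¬ (1500 < t) := by omega
    have c8 : ¬ (9999 < t) := by omega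
    simp [hr, List.foldl, PySem.List.pyGet?, PySem.List.pyIdx?, c0, c1, c2, c3, c4, c5, c6, c7, c8]
  · have hb : pvBisect [30,120,300,420,600,750,1000,1500,9999] t 0 9 = 2 := by
      simp [pvBisect, PySem.List.pyGet?, PySem.List.pyIdx?]
      split_ifs <;> omega
    rw [hb]
    have c1 : 120 < t := by omega
    have c2 : ¬ (300 < t) := by omega
    have c3 : ¬ (420 < t) := by omega
    have c4 : ¬ (600 < t) := by omega
    have c5 : ¬ (750 < t) := by omega
    have c6 : ¬ (1000 < t) := by omega
    have c7 : ¬ (1500 < t) := by omega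
    have c8 : ¬ (9999 < t) := by omega
    simp [hr, List.foldl, PySem.List.pyGet?, PySem.List.pyIdx?, c1, c2, c3, c4, c5, c6, c7, c8]
  · have hb : pvBisect [30,120,300,420,600,750,1000,1500,9999] t 0 9 = 3 := by
      simp [pvBisect, PySem.List.pyGet?, PySem.List.pyIdx?]
      split_ifs <;> omega
    rw [hb]
    have c2 : 300 < t := by omega
    have c3 : ¬ (420 < t) := by omega
    have c4 : ¬ (600 < t) := by omega
    have c5 : ¬ (750 < t) := by omega
    have c6 : ¬ (1000 < t) := by omega
    have c7 : ¬ (1500 < t) := by omega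
    have c8 : ¬ (9999 < t) := by omega
    simp [hr, List.foldl, PySem.List.pyGet?, PySem.List.pyIdx?, c2, c3, c4, c5, c6, c7, c8]
  · have hb : pvBisect [30,120,300,420,600,750,1000,1500,9999] t 0 9 = 4 := by
      simp [pvBisect, PySem.List.pyGet?, PySem.List.pyIdx?]
      split_ifs <;> omega
    rw [hb]
    have c3 : 420 < t := by omega
    have c4 : ¬ (600 < t) := by omega
    have c5 : ¬ (750 < t) := by omega
    have c6 : ¬ (1000 < t) := by omega
    have c7 : ¬ (1500 < t) := by omega
    have c8 : ¬ (9999 < t) := by omega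
    simp [hr, List.foldl, PySem.List.pyGet?, PySem.List.pyIdx?, c3, c4, c5, c6, c7, c8]
  · have hb : pvBisect [30,120,300,420,600,750,1000,1500,9999] t 0 9 = 5 := by
      simp [pvBisect, PySem.List.pyGet?, PySem.List.pyIdx?]
      split_ifs <;> omega
    rw [hb]
    have c4 : 600 < t := by omega
    have c5 : ¬ (750 < t) := by omega
    have c6 : ¬ (1000 < t) := by omega
    have c7 : ¬ (1500 < t) := by omega
    have c8 : ¬ (9999 < t) := by omega
    simp [hr, List.foldl, PySem.List.pyGet?, PySem.List.pyIdx?, c4, c5, c6, c7, c8]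
  · have hb : pvBisect [30,120,300,420,600,750,1000,1500,9999] t 0 9 = 6 := by
      simp [pvBisect, PySem.List.pyGet?, PySem.List.pyIdx?]
      split_ifs <;> omega
    rw [hb]
    have c5 : 750 < t := by omega
    have c6 : ¬ (1000 < t) := by omega
    have c7 : ¬ (1500 < t) := by omega
    have c8 : ¬ (9999 < t) := by omega
    simp [hr, List.foldl, PySem.List.pyGet?, PySem.List.pyIdx?, c5, c6, c7, c8]
  · have hb : pvBisect [30,120,300,420,600,750,1000,1500,9999] t 0 9 = 7 := by
      simp [pvBisect, PySem.List.pyGet?, PySem.List.pyIdx?]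
      split_ifs <;> omega
    rw [hb]
    have c6 : 1000 < t := by omega
    have c7 : ¬ (1500 < t) := by omega
    have c8 : ¬ (9999 < t) := by omega
    simp [hr, List.foldl, PySem.List.pyGet?, PySem.List.pyIdx?, c6, c7, c8]
  · have hb : pvBisect [30,120,300,420,600,750,1000,1500,9999] t 0 9 = 8 := by
      simp [pvBisect, PySem.List.pyGet?, PySem.List.pyIdx?]
      split_ifs <;> omega
    rw [hb]
    have c7 : 1500 < t := by omega
    have c8 : ¬ (9999 < t) := by omega
    simp [hr, List.foldl, PySem.List.pyGet?, PySem.List.pyIdx?, c7, c8]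

-- ===== VERDICT (by name: the statement is the Claim_ definition above) =====
theorem format_prizes_spec : Claim_equal_format_prizes := by
  intro members _hdom ⟨_hk, h1, h2⟩
  unfold Spec_format_prizes format_prizes format_prizes_alt
  have := pv_core _ h1 h2
  simp only [this]
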